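-- pv_equiv track=rewrite | github.com/Polipaul13/for_resume | venv/scheme/machine_learning.py | find_unique_params
-- ===== SOURCE A (Python) =====
-- def find_unique_params(params):
--     uni = []
--     for el in params:
--         p = params[el]
--         for s in p:
--             if s not in uni:
--                 uni.append(s)
--     uni = sorted(uni)
--     return uni
-- ===== SOURCE B (Python) =====
-- def find_unique_params(params):
--     flat = [v for vs in params.values() for v in vs]
--     flat = sorted(flat)
--     uni = []
--     prev = None
--     for v in flat:
--         if prev is None or v != prev:
--             uni.append(v)
--             prev = v
--     return uni
-- ===== Notes on version B (the rewrite author's own statement) =====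
-- stated objective: faster
-- what changed: Replaces A's quadratic membership-scan dedup (s not in uni per element) followed by a sort with flatten once, sort once, then a single adjacent-dedup pass over the sorted list.
import Mathlib
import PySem

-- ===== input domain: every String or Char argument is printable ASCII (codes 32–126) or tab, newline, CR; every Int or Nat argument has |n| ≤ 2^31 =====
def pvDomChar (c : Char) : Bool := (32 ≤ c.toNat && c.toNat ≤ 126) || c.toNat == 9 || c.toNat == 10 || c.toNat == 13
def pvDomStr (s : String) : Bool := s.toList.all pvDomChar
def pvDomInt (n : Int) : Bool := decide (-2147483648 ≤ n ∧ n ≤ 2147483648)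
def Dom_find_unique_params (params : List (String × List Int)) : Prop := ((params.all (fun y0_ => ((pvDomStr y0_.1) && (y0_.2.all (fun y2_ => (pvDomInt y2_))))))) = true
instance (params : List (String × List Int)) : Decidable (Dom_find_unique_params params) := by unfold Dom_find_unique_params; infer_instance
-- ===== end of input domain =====

-- B changes the algorithm: flatten all value-lists, sort once, then one adjacent-dedup pass,
-- instead of A's quadratic membership-scan dedup followed by a sort.

-- ===== PORT A =====
-- for el in params: p = params[el] — iterating a dict's keys and indexing with each key
-- yields exactly that entry's value, so the pair's value el.2 is used directly.
def find_unique_params (params : List (String × List Int)) : List Int :=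
  let uni := params.foldl (fun uni el =>
    let p := el.2
    p.foldl (fun uni s => if s ∈ uni then uni else uni ++ [s]) uni) []
  PySem.List.sorted uni (fun x => x) false

-- ===== PORT B =====
def find_unique_params_alt (params : List (String × List Int)) : List Int :=
  let flat := params.flatMap (fun vs => vs.2)
  let flat := PySem.List.sorted flat (fun x => x) false
  let st := flat.foldl (fun (st : List Int × Option Int) v =>
      match st.2 with
      | none => (st.1 ++ [v], some v)
      | some p => if v ≠ p then (st.1 ++ [v], some v) else st) (([] : List Int), (none : Option Int))
  st.1

-- ===== PRECONDITION & SPEC =====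
def Spec_find_unique_params (params : List (String × List Int)) (out : List Int) : Prop := out = find_unique_params_alt params
instance (params : List (String × List Int)) (out : List Int) : Decidable (Spec_find_unique_params params out) := by unfold Spec_find_unique_params; infer_instance

-- ===== CLAIM (what is proved, stated in full; the proofs are below) =====
def Claim_equal_find_unique_params : Prop := ∀ (params : List (String × List Int)), Dom_find_unique_params params → Spec_find_unique_params params (find_unique_params params)

-- ===== LEMMAS AND PROOFS =====

-- adjacent-dedup of B's loop, in recursive form (proof helper)
def pvDD : Option Int → List Int → List Int
  | _, [] => []
  | none, v :: vs => v :: pvDD (some v) vs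
  | some p, v :: vs => if v ≠ p then v :: pvDD (some v) vs else pvDD (some p) vs

theorem pvDD_foldl (xs : List Int) (out : List Int) (pr : Option Int) :
    (xs.foldl (fun (st : List Int × Option Int) v =>
      match st.2 with
      | none => (st.1 ++ [v], some v)
      | some p => if v ≠ p then (st.1 ++ [v], some v) else st) (out, pr)).1
    = out ++ pvDD pr xs := by
  induction xs generalizing out pr with
  | nil => simp [pvDD]
  | cons v vs ih =>
    rw [List.foldl_cons]
    cases pr with
    | none =>
      exact (ih (out ++ [v]) (some v)).trans (by simp [pvDD])
    | some p =>
      show (List.foldl _ (if v ≠ p then (out ++ [v], some v) else (out, some p)) vs).1 = _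
      by_cases h : v = p
      · rw [if_neg (by simpa using h)]
        exact (ih out (some p)).trans (by simp [pvDD, h])
      · rw [if_pos h]
        exact (ih (out ++ [v]) (some v)).trans (by simp [pvDD, h])

theorem pv_inner_mem (p : List Int) (acc : List Int) (x : Int) :
    x ∈ p.foldl (fun uni s => if s ∈ uni then uni else uni ++ [s]) acc ↔ x ∈ acc ∨ x ∈ p := by
  induction p generalizing acc with
  | nil => simp
  | cons s rest ih =>
    by_cases h : s ∈ acc
    · simp only [List.foldl_cons, if_pos h, ih, List.mem_cons]
      constructor
      · rintro (hx | hx)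
        · exact Or.inl hx
        · exact Or.inr (Or.inr hx)
      · rintro (hx | hx | hx)
        · exact Or.inl hx
        · exact Or.inl (hx ▸ h)
        · exact Or.inr hx
    · simp only [List.foldl_cons, if_neg h, ih, List.mem_append, List.mem_cons]
      tauto

theorem pv_inner_nodup (p : List Int) (acc : List Int) (hn : acc.Nodup) :
    (p.foldl (fun uni s => if s ∈ uni then uni else uni ++ [s]) acc).Nodup := by
  induction p generalizing acc with
  | nil => exact hn
  | cons s rest ih =>
    by_cases h : s ∈ acc
    · simpa [h] using ih acc hn
    · simp only [List.foldl_cons, if_neg h]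
      refine ih _ ?_
      simp only [List.nodup_append, List.nodup_singleton, true_and]
      refine ⟨hn, ?_⟩
      intro a ha b hb
      rcases List.mem_singleton.mp hb with rfl
      exact fun he => h (he ▸ ha)

theorem pv_outer_mem (params : List (String × List Int)) (acc : List Int) (x : Int) :
    x ∈ params.foldl (fun uni el =>
        el.2.foldl (fun uni s => if s ∈ uni then uni else uni ++ [s]) uni) acc
      ↔ x ∈ acc ∨ ∃ pr ∈ params, x ∈ pr.2 := by
  induction params generalizing acc with
  | nil => simp
  | cons el rest ih =>
    simp only [List.foldl_cons, ih, pv_inner_mem, List.mem_cons]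
    constructor
    · rintro ((hx | hx) | ⟨pr, hpr, hx⟩)
      · exact Or.inl hx
      · exact Or.inr ⟨el, Or.inl rfl, hx⟩
      · exact Or.inr ⟨pr, Or.inr hpr, hx⟩
    · rintro (hx | ⟨pr, (hpr | hpr), hx⟩)
      · exact Or.inl (Or.inl hx)
      · exact Or.inl (Or.inr (hpr ▸ hx))
      · exact Or.inr ⟨pr, hpr, hx⟩

theorem pv_outer_nodup (params : List (String × List Int)) (acc : List Int) (hn : acc.Nodup) :
    (params.foldl (fun uni el =>
        el.2.foldl (fun uni s => if s ∈ uni then uni else uni ++ [s]) uni) acc).Nodup := by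
  induction params generalizing acc with
  | nil => exact hn
  | cons el rest ih => exact ih _ (pv_inner_nodup _ _ hn)

theorem pvDD_mem (xs : List Int) (p? : Option Int)
    (hpair : xs.Pairwise (· ≤ ·))
    (hlb : ∀ p, p? = some p → ∀ x ∈ xs, p ≤ x) :
    ∀ x, x ∈ pvDD p? xs ↔ x ∈ xs ∧ p? ≠ some x := by
  induction xs generalizing p? with
  | nil => simp [pvDD]
  | cons v vs ih =>
    obtain ⟨hforall, hpv⟩ := List.pairwise_cons.mp hpair
    have hlbv : ∀ p, some v = some p → ∀ x ∈ vs, p ≤ x := by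
      intro p hp; injection hp with hp; subst hp; exact hforall
    have ihv := ih (some v) hpv hlbv
    intro x
    cases p? with
    | none =>
      rw [show pvDD none (v :: vs) = v :: pvDD (some v) vs from rfl,
        List.mem_cons, ihv x]
      constructor
      · rintro (rfl | ⟨hx, _⟩)
        · exact ⟨List.mem_cons_self, by simp⟩
        · exact ⟨List.mem_cons_of_mem _ hx, by simp⟩
      · rintro ⟨hx, -⟩
        by_cases hxv : x = v
        · exact Or.inl hxv
        · rcases List.mem_cons.mp hx with rfl | hx2
          · exact Or.inl rfl
          · exact Or.inr ⟨hx2, fun he => hxv (Option.some.inj he).symm⟩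
    | some p =>
      have hpv' : p ≤ v := hlb p rfl v List.mem_cons_self
      by_cases h : v = p
      · subst h
        rw [show pvDD (some v) (v :: vs) = pvDD (some v) vs from by simp [pvDD], ihv x]
        constructor
        · rintro ⟨hx, hne⟩
          exact ⟨List.mem_cons_of_mem _ hx, hne⟩
        · rintro ⟨hx, hne⟩
          rcases List.mem_cons.mp hx with rfl | hx2
          · exact absurd rfl hne
          · exact ⟨hx2, hne⟩
      · have hplt : p < v := lt_of_le_of_ne hpv' (fun he => h he.symm)
        rw [show pvDD (some p) (v :: vs) = v :: pvDD (some v) vs from by simp [pvDD, h],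
          List.mem_cons, ihv x]
        constructor
        · rintro (rfl | ⟨hx, -⟩)
          · exact ⟨List.mem_cons_self, fun he => absurd (Option.some.inj he) hplt.ne⟩
          · exact ⟨List.mem_cons_of_mem _ hx,
              fun he => absurd (Option.some.inj he) (lt_of_lt_of_le hplt (hforall x hx)).ne⟩
        · rintro ⟨hx, -⟩
          by_cases hxv : x = v
          · exact Or.inl hxv
          · rcases List.mem_cons.mp hx with rfl | hx2
            · exact Or.inl rfl
            · exact Or.inr ⟨hx2, fun he => hxv (Option.some.inj he).symm⟩

theorem pvDD_pairwise (xs : List Int) (p? : Option Int)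
    (hpair : xs.Pairwise (· ≤ ·))
    (hlb : ∀ p, p? = some p → ∀ x ∈ xs, p ≤ x) :
    ((p?.toList ++ pvDD p? xs).Pairwise (· < ·)) := by
  induction xs generalizing p? with
  | nil => cases p? <;> simp [pvDD]
  | cons v vs ih =>
    obtain ⟨hforall, hpv⟩ := List.pairwise_cons.mp hpair
    have hlbv : ∀ p, some v = some p → ∀ x ∈ vs, p ≤ x := by
      intro p hp; injection hp with hp; subst hp; exact hforall
    have htail := ih (some v) hpv hlbv
    rw [Option.toList_some, List.singleton_append] at htail
    cases p? with
    | none =>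
      rw [show pvDD none (v :: vs) = v :: pvDD (some v) vs from rfl]
      simpa using htail
    | some p =>
      have hpv' : p ≤ v := hlb p rfl v List.mem_cons_self
      rw [Option.toList_some, List.singleton_append]
      by_cases h : v = p
      · subst h
        rw [show pvDD (some v) (v :: vs) = pvDD (some v) vs from by simp [pvDD]]
        exact htail
      · have hplt : p < v := lt_of_le_of_ne hpv' (fun he => h he.symm)
        rw [show pvDD (some p) (v :: vs) = v :: pvDD (some v) vs from by simp [pvDD, h],
          List.pairwise_cons]
        refine ⟨?_, htail⟩
        intro x hx
        rcases List.mem_cons.mp hx with rfl | hx2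
        · exact hplt
        · have hxm := (pvDD_mem vs (some v) hpv hlbv x).mp hx2
          exact lt_of_lt_of_le hplt (hforall x hxm.1)

theorem find_unique_params_eq (params : List (String × List Int)) :
    find_unique_params params = find_unique_params_alt params := by
  unfold find_unique_params find_unique_params_alt
  simp only []
  set uniA := params.foldl (fun uni el =>
      el.2.foldl (fun uni s => if s ∈ uni then uni else uni ++ [s]) uni) [] with huniA
  set flat := params.flatMap (fun vs => vs.2) with hflat
  set sflat := PySem.List.sorted flat (fun x => x) false with hsflat
  rw [pvDD_foldl]
  simp only [List.nil_append]
  have hsp : sflat.Pairwise (· ≤ ·) := by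
    simpa using PySem.List.sorted_pairwise flat (fun x => x)
  have hlb : ∀ p, (none : Option Int) = some p → ∀ x ∈ sflat, p ≤ x := by
    rintro p h; cases h
  have hBpair : (pvDD none sflat).Pairwise (· < ·) := by
    simpa using pvDD_pairwise sflat none hsp hlb
  have hBnodup : (pvDD none sflat).Nodup := hBpair.imp (fun h => h.ne)
  have hAnodup : uniA.Nodup := pv_outer_nodup params [] List.nodup_nil
  have hmem : ∀ x, x ∈ pvDD none sflat ↔ x ∈ uniA := by
    intro x
    rw [pvDD_mem sflat none hsp hlb, huniA, pv_outer_mem]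
    simp only [List.not_mem_nil, false_or, Ne, reduceCtorEq, not_false_iff, and_true]
    rw [hsflat, PySem.List.mem_sorted, hflat, List.mem_flatMap]
  have hperm : (pvDD none sflat).Perm uniA :=
    (List.perm_ext_iff_of_nodup hBnodup hAnodup).mpr hmem
  exact PySem.List.sorted_eq_of_perm_of_pairwise_lt _ _ (fun x => x) hperm hBpair

-- ===== VERDICT (by name: the statement is the Claim_ definition above) =====
theorem find_unique_params_spec : Claim_equal_find_unique_params := by
  intro params _
  unfold Spec_find_unique_params
  exact find_unique_params_eq params
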